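-- pv_equiv track=rewrite | github.com/MrBrantCode/unitest_baseline | mut_generate/mist_train_cf/cf_86617/solution.py | find_non_unique_elements
-- ===== SOURCE A (Python) =====
-- def find_non_unique_elements(lst):
--     frequency_count = {}
--     for i in range(len(lst)):
--         count = 0
--         for j in range(len(lst)):
--             if lst[i] == lst[j]:
--                 count += 1
--         frequency_count[lst[i]] = count
--
--     non_unique_elements = [element for element in lst if frequency_count[element] > 1]
--     non_unique_elements.sort(key=lambda x: (frequency_count[x], lst.index(x)))
--     return non_unique_elements
-- ===== SOURCE B (Python) =====
-- def find_non_unique_elements(lst):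
--     # One counting pass over lst; then sort only the (value, count) duplicate
--     # groups and expand each group to value*count, instead of counting each
--     # element with a nested scan and sorting every occurrence individually.
--     counts = {}
--     for x in lst:
--         counts[x] = counts.get(x, 0) + 1
--     dups = [(v, c) for v, c in counts.items() if c > 1]
--     dups.sort(key=lambda vc: (vc[1], lst.index(vc[0])))
--     out = []
--     for v, c in dups:
--         out.extend([v] * c)
--     return out
-- ===== Notes on version B (the rewrite author's own statement) =====
-- stated objective: faster
-- what changed: Replaces the nested O(n^2) per-element counting and the sort of every occurrence by one dict counting pass, a sort of only the (value, count) duplicate groups, and expansion of each group to value*count.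
import Mathlib
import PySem

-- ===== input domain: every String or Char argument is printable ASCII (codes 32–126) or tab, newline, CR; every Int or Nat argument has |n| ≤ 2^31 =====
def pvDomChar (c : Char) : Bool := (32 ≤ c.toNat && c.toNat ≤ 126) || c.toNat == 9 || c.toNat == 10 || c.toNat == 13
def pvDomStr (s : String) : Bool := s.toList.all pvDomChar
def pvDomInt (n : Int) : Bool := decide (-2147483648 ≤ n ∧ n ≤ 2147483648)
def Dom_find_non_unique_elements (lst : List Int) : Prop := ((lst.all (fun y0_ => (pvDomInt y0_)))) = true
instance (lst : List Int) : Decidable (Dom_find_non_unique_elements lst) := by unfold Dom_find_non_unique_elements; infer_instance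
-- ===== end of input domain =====

-- B replaces A's nested-scan counting and the sort of every occurrence by one dict
-- counting pass, a sort of the (value, count) duplicate groups only, and expansion
-- of each group to value*count.


-- ===== PORT A =====
-- frequency_count loop: dict key lst[i], value = the inner counting loop over j.
-- i, j ∈ range(len(lst)), so pyGetD with a default is exact; frequency_count[element]
-- and lst.index(x) are only applied to members of lst, so Dict.getD / (index? …).getD 0
-- are exact there (key present, element found).
def pvA_freq (lst : List Int) : PySem.Dict Int Int :=
  (PySem.List.pyRange 0 (lst.length : Int) 1).foldl (fun fc i =>
    let count : Int :=
      (PySem.List.pyRange 0 (lst.length : Int) 1).foldl (fun count j =>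
        if PySem.List.pyGetD lst i 0 == PySem.List.pyGetD lst j 0 then count + 1 else count) 0
    fc.insert (PySem.List.pyGetD lst i 0) count) PySem.Dict.empty

def find_non_unique_elements (lst : List Int) : List Int :=
  let frequency_count := pvA_freq lst
  let non_unique_elements := lst.filter (fun element => frequency_count.getD element 0 > 1)
  PySem.List.sorted2 non_unique_elements
    (fun x => frequency_count.getD x 0)
    (fun x => (((PySem.List.index? lst x).getD 0 : Nat) : Int))

-- ===== PORT B =====
-- counts[x] = counts.get(x, 0) + 1 loop; then filter and sort the (value, count)
-- group pairs and expand each group: [v] * c is pyRepeat [v] c.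
-- lst.index(v) has v ∈ lst, so (index? …).getD 0 is exact.
def pvB_counts (lst : List Int) : PySem.Dict Int Int :=
  lst.foldl (fun d x => d.insert x (d.getD x 0 + 1)) PySem.Dict.empty

def find_non_unique_elements_alt (lst : List Int) : List Int :=
  let dups := (pvB_counts lst).items.filter (fun vc => vc.2 > 1)
  let sortedDups := PySem.List.sorted2 dups
    (fun vc => vc.2)
    (fun vc => (((PySem.List.index? lst vc.1).getD 0 : Nat) : Int))
  sortedDups.foldl (fun out vc => out ++ PySem.List.pyRepeat [vc.1] vc.2) []

-- ===== PRECONDITION & SPEC =====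
def Spec_find_non_unique_elements (lst : List Int) (out : List Int) : Prop := out = find_non_unique_elements_alt lst
instance (lst : List Int) (out : List Int) : Decidable (Spec_find_non_unique_elements lst out) := by unfold Spec_find_non_unique_elements; infer_instance

-- ===== CLAIM (what is proved, stated in full; the proofs are below) =====
def Claim_equal_find_non_unique_elements : Prop := ∀ (lst : List Int), Dom_find_non_unique_elements lst → Spec_find_non_unique_elements lst (find_non_unique_elements lst)

-- ===== LEMMAS AND PROOFS =====

-- first-occurrence index of x in lst, as both sort keys use it
def pvIdx (lst : List Int) (x : Int) : Int := (((PySem.List.index? lst x).getD 0 : Nat) : Int)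

-- the common lexicographic sort key (multiplicity, first index)
def pvKey (lst : List Int) (x : Int) : Int ×ₗ Int := toLex ((lst.count x : Int), pvIdx lst x)

-- B's intermediate data, named for the proofs
def pvP (lst : List Int) : Int → Bool := fun v => decide (1 < (lst.count v : Int))
def pvDups (lst : List Int) : List (Int × Int) := (pvB_counts lst).items.filter (fun vc => vc.2 > 1)
def pvG (lst : List Int) : List (Int × Int) :=
  PySem.List.sorted2 (pvDups lst) (fun vc => vc.2)
    (fun vc => (((PySem.List.index? lst vc.1).getD 0 : Nat) : Int))
def pvRep : Int × Int → List Int := fun vc => PySem.List.pyRepeat [vc.1] vc.2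

lemma pvIdx_inj (lst : List Int) {a b : Int} (ha : a ∈ lst) (hb : b ∈ lst)
    (h : pvIdx lst a = pvIdx lst b) : a = b := by
  obtain ⟨ka, hka⟩ := Option.isSome_iff_exists.1 ((PySem.List.index?_isSome_iff lst a).2 ha)
  obtain ⟨kb, hkb⟩ := Option.isSome_iff_exists.1 ((PySem.List.index?_isSome_iff lst b).2 hb)
  unfold pvIdx at h
  rw [hka, hkb] at h
  simp at h
  obtain ⟨hlta, hga, -⟩ := PySem.List.getElem_of_index?_eq_some hka
  obtain ⟨hltb, hgb, -⟩ := PySem.List.getElem_of_index?_eq_some hkb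
  subst h
  rw [← hga, ← hgb]

-- sorted2 with Int keys is sorted with the lexicographic product key
lemma sorted2_eq_sorted_lex {α : Type} (xs : List α) (k1 k2 : α → Int) :
    PySem.List.sorted2 xs k1 k2 = PySem.List.sorted xs (fun x => toLex (k1 x, k2 x)) := by
  have h : (fun (a b : α) => decide (k1 a < k1 b) || (!decide (k1 b < k1 a) && decide (k2 a < k2 b)))
      = (fun (a b : α) =>
          decide ((fun x => toLex (k1 x, k2 x)) a < (fun x => toLex (k1 x, k2 x)) b)) := by
    funext a b
    by_cases h1 : k1 a < k1 b <;> by_cases h2 : k1 b < k1 a <;> by_cases h3 : k2 a < k2 b <;>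
      simp [h1, h2, h3, Prod.Lex.toLex_lt_toLex] <;> omega
  show List.foldl (fun acc x => PySem.List.insertBy
      (fun a b => decide (k1 a < k1 b) || (!decide (k1 b < k1 a) && decide (k2 a < k2 b))) x acc) [] xs = _
  rw [h]
  rfl

lemma countP_eq_count (y : Int) (l : List Int) : l.countP (fun z => y == z) = l.count y := by
  induction l with
  | nil => rfl
  | cons x t ih =>
    by_cases hyx : y = x
    · subst hyx; simp [ih]
    · simp [ih, hyx, Ne.symm hyx]

-- a fold that inserts x ↦ g x for every x of l: lookup is g on members of l
lemma getD_foldl_insert_fn (g : Int → Int) (l : List Int) (d : PySem.Dict Int Int) (v : Int) :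
    (l.foldl (fun fc x => fc.insert x (g x)) d).getD v 0
      = if v ∈ l then g v else d.getD v 0 := by
  induction l generalizing d with
  | nil => simp
  | cons x t ih =>
    rw [List.foldl_cons, ih]
    by_cases hvt : v ∈ t
    · simp [hvt]
    · by_cases hvx : v = x
      · subst hvx; simp [pysem, hvt]
      · simp [pysem, hvt, hvx]

-- A's frequency dict holds the multiplicity in lst, on members of lst
lemma pvA_freq_getD (lst : List Int) {v : Int} (hv : v ∈ lst) :
    (pvA_freq lst).getD v 0 = (lst.count v : Int) := by
  have h0 : pvA_freq lst = List.foldl (fun fc y => PySem.Dict.insert fc y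
      (List.foldl (fun c j => if y == PySem.List.pyGetD lst j 0 then c + 1 else c) 0
        (PySem.List.pyRange 0 (lst.length : Int) 1))) PySem.Dict.empty lst := by
    show List.foldl (fun fc i => PySem.Dict.insert fc (PySem.List.pyGetD lst i 0)
        (List.foldl (fun c j =>
            if PySem.List.pyGetD lst i 0 == PySem.List.pyGetD lst j 0 then c + 1 else c) 0
          (PySem.List.pyRange 0 (lst.length : Int) 1)))
        PySem.Dict.empty (PySem.List.pyRange 0 (lst.length : Int) 1) = _
    rw [PySem.List.foldl_pyRange_zero_pyGetD' lst 0 (fun fc y => PySem.Dict.insert fc y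
        (List.foldl (fun c j => if y == PySem.List.pyGetD lst j 0 then c + 1 else c) 0
          (PySem.List.pyRange 0 (lst.length : Int) 1))) PySem.Dict.empty]
  rw [h0, getD_foldl_insert_fn, if_pos hv]
  show List.foldl (fun c j => if v == PySem.List.pyGetD lst j 0 then c + 1 else c) 0
      (PySem.List.pyRange 0 (lst.length : Int) 1) = _
  rw [PySem.List.foldl_pyRange_zero_pyGetD' lst 0 (fun c z => if v == z then c + 1 else c) 0]
  rw [PySem.List.foldl_if_add_one (fun z => v == z)]
  rw [countP_eq_count]
  omega

-- B's duplicate group list, explicitly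
lemma pvB_dups_eq (lst : List Int) :
    pvDups lst
      = ((PySem.List.dedup lst).filter (pvP lst)).map (fun v => (v, (lst.count v : Int))) := by
  unfold pvDups
  have h1 : pvB_counts lst = PySem.Dict.counter lst :=
    PySem.Dict.foldl_insert_getD_add_one_eq_counter lst
  rw [h1, PySem.Dict.items_counter, List.filter_map, PySem.List.dedup_eq_ofList]
  rfl

-- multiset identity: expanding each distinct value to its multiplicity
lemma count_flatMap_replicate (G : List Int) (hG : G.Nodup) (g : Int → Nat) (a : Int) :
    (G.flatMap (fun v => List.replicate (g v) v)).count a = if a ∈ G then g a else 0 := by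
  induction G with
  | nil => simp
  | cons w G ih =>
    obtain ⟨hw, hG'⟩ := List.nodup_cons.1 hG
    by_cases haw : a = w
    · subst haw
      simp [List.count_append, ih hG', hw]
    · simp [List.count_append, ih hG', List.count_replicate, haw, Ne.symm haw]

lemma perm_flatMap_replicate_filter (lst : List Int) (p : Int → Bool) :
    (((PySem.List.dedup lst).filter p).flatMap (fun v => List.replicate (lst.count v) v)).Perm
      (lst.filter p) := by
  rw [List.perm_iff_count]
  intro a
  rw [count_flatMap_replicate _ ((PySem.List.nodup_dedup lst).filter p) (fun v => lst.count v) a]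
  by_cases hp : p a
  · by_cases hm : a ∈ lst
    · rw [if_pos (List.mem_filter.2 ⟨(PySem.List.mem_dedup lst a).2 hm, hp⟩), List.count_filter hp]
    · rw [if_neg (fun hc => hm ((PySem.List.mem_dedup lst a).1 (List.mem_of_mem_filter hc))),
        Eq.comm, List.count_eq_zero]
      exact fun hc => hm (List.mem_of_mem_filter hc)
  · rw [if_neg (fun hc => hp (List.of_mem_filter hc)), Eq.comm, List.count_eq_zero]
    exact fun hc => hp (List.of_mem_filter hc)

-- ===== VERDICT (by name: the statement is the Claim_ definition above) =====
theorem find_non_unique_elements_spec : Claim_equal_find_non_unique_elements := by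
  intro lst _
  unfold Spec_find_non_unique_elements
  have hA : find_non_unique_elements lst
      = PySem.List.sorted2 (lst.filter (fun element => decide ((pvA_freq lst).getD element 0 > 1)))
          (fun x => (pvA_freq lst).getD x 0)
          (fun x => (((PySem.List.index? lst x).getD 0 : Nat) : Int)) := rfl
  have hDeq : lst.filter (fun element => decide ((pvA_freq lst).getD element 0 > 1))
      = lst.filter (pvP lst) :=
    List.filter_congr (fun x hx => by simp only [pvP]; rw [pvA_freq_getD lst hx])
  have hBflat : find_non_unique_elements_alt lst = (pvG lst).flatMap pvRep := by
    have h1 : find_non_unique_elements_alt lst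
        = (pvG lst).foldl (fun out vc => out ++ PySem.List.pyRepeat [vc.1] vc.2) [] := rfl
    rw [h1, PySem.List.foldl_append_eq_flatMap (fun vc => PySem.List.pyRepeat [vc.1] vc.2)
      (pvG lst) []]
    rfl
  -- the permutations down to the unsorted duplicate list
  have permA : (find_non_unique_elements lst).Perm (lst.filter (pvP lst)) := by
    rw [hA, hDeq]
    exact PySem.List.sorted2_perm _ _ _ _
  have permB : (find_non_unique_elements_alt lst).Perm (lst.filter (pvP lst)) := by
    rw [hBflat]
    have hgp : (pvG lst).Perm (pvDups lst) := PySem.List.sorted2_perm _ _ _ _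
    have hstep : (List.flatMap pvRep (pvDups lst)).Perm (lst.filter (pvP lst)) := by
      rw [pvB_dups_eq, List.flatMap_map]
      simp only [pvRep, PySem.List.pyRepeat_singleton, Int.toNat_natCast]
      exact perm_flatMap_replicate_filter lst (pvP lst)
    exact (List.Perm.flatMap_right pvRep hgp).trans hstep
  -- both outputs are pairwise nondecreasing in the key
  have h2 : (find_non_unique_elements lst).Pairwise (fun a b => pvKey lst a ≤ pvKey lst b) := by
    rw [hA, hDeq, sorted2_eq_sorted_lex]
    refine List.Pairwise.imp_of_mem ?_ (PySem.List.sorted_pairwise _ _)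
    intro a b ha hb hR
    have haL : a ∈ lst := List.mem_of_mem_filter ((PySem.List.mem_sorted _ _ _ _).1 ha)
    have hbL : b ∈ lst := List.mem_of_mem_filter ((PySem.List.mem_sorted _ _ _ _).1 hb)
    simp only at hR
    rw [pvA_freq_getD lst haL, pvA_freq_getD lst hbL] at hR
    simpa [pvKey, pvIdx] using hR
  have h3 : (find_non_unique_elements_alt lst).Pairwise (fun a b => pvKey lst a ≤ pvKey lst b) := by
    rw [hBflat]
    have hflat : (pvG lst).flatMap pvRep = ((pvG lst).map pvRep).flatten := rfl
    rw [hflat, List.pairwise_flatten]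
    constructor
    · intro l hl
      obtain ⟨vc, hvc, rfl⟩ := List.mem_map.1 hl
      simp only [pvRep, PySem.List.pyRepeat_singleton]
      exact List.pairwise_replicate.2 (Or.inr le_rfl)
    · rw [List.pairwise_map]
      have hGs : pvG lst = PySem.List.sorted (pvDups lst)
          (fun vc => toLex ((fun vc : Int × Int => vc.2) vc,
            (fun vc : Int × Int => (((PySem.List.index? lst vc.1).getD 0 : Nat) : Int)) vc)) := by
        unfold pvG
        exact sorted2_eq_sorted_lex _ _ _
      rw [hGs]
      refine List.Pairwise.imp_of_mem ?_ (PySem.List.sorted_pairwise _ _)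
      intro p q hp hq hR x hx y hy
      have hp' : p ∈ pvDups lst := (PySem.List.mem_sorted _ _ _ _).1 hp
      have hq' : q ∈ pvDups lst := (PySem.List.mem_sorted _ _ _ _).1 hq
      rw [pvB_dups_eq] at hp' hq'
      obtain ⟨vp, hvp, rfl⟩ := List.mem_map.1 hp'
      obtain ⟨vq, hvq, rfl⟩ := List.mem_map.1 hq'
      have hx' : x = vp := by
        apply List.eq_of_mem_replicate (n := lst.count vp)
        simpa [pvRep, PySem.List.pyRepeat_singleton] using hx
      have hy' : y = vq := by
        apply List.eq_of_mem_replicate (n := lst.count vq)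
        simpa [pvRep, PySem.List.pyRepeat_singleton] using hy
      subst hx' hy'
      simp only at hR
      simpa [pvKey, pvIdx] using hR
  -- keys are antisymmetric on members of lst
  have h4 : ∀ a b : Int, a ∈ find_non_unique_elements lst → b ∈ find_non_unique_elements_alt lst →
      pvKey lst a ≤ pvKey lst b → pvKey lst b ≤ pvKey lst a → a = b := by
    intro a b ha hb hab hba
    have haL : a ∈ lst := List.mem_of_mem_filter (permA.mem_iff.1 ha)
    have hbL : b ∈ lst := List.mem_of_mem_filter (permB.mem_iff.1 hb)
    have hkey : pvKey lst a = pvKey lst b := le_antisymm hab hba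
    simp only [pvKey, toLex_inj, Prod.mk.injEq] at hkey
    exact pvIdx_inj lst haL hbL hkey.2
  exact List.Perm.eq_of_pairwise h4 h2 h3 (permA.trans permB.symm)
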